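-- pv_equiv track=rewrite | github.com/shlevanto/AoC | 2024/14/14.py | quadrant_counts
-- ===== SOURCE A (Python) =====
-- def quadrant_counts(arr, end_positions):
--     a, b, c, d = 0, 0, 0, 0
--     mid_y, mid_x = arr[0] // 2, arr[1] // 2
--
--     for robot in end_positions:
--         if robot[0] == mid_x or robot[1] == mid_y:
--             continue
--         if robot [0] < mid_x and robot[1] < mid_y:
--             a += 1
--         if robot [0] > mid_x and robot[1] < mid_y:
--             b += 1
--         if robot [0] < mid_x and robot[1] > mid_y:
--             c += 1
--         if robot [0] > mid_x and robot[1] > mid_y: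
--             d += 1
--
--     return (a, b, c, d)
-- ===== SOURCE B (Python) =====
-- def quadrant_counts(arr, end_positions):
--     mid_y, mid_x = arr[0] // 2, arr[1] // 2
--     a = sum(1 for r in end_positions if r[0] < mid_x and r[1] < mid_y)
--     b = sum(1 for r in end_positions if r[0] > mid_x and r[1] < mid_y)
--     c = sum(1 for r in end_positions if r[0] < mid_x and r[1] > mid_y)
--     d = sum(1 for r in end_positions if r[0] > mid_x and r[1] > mid_y)
--     return (a, b, c, d)
-- ===== Notes on version B (the rewrite author's own statement) =====
-- stated objective: simpler
-- what changed: Replaces the single stateful classifying loop (with an explicit midline-skip branch and four mutable counters) by four independent filtered counts, one per quadrant; strict inequalities make the skip unnecessary.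
import Mathlib
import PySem

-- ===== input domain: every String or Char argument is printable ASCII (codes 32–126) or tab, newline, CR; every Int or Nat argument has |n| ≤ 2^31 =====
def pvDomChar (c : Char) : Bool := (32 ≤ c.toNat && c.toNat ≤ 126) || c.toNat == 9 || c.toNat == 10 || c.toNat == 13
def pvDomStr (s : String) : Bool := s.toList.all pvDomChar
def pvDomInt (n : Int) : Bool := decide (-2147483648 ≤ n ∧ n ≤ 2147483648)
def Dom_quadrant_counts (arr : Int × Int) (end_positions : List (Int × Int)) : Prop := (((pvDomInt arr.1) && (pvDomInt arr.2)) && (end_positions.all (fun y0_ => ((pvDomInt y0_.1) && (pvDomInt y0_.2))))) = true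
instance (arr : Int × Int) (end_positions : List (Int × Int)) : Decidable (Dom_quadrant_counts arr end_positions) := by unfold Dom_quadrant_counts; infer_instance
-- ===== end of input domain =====

-- B replaces A's single stateful classifying loop by four independent per-quadrant
-- filtered counts (objective: simpler); same O(n) cost.

-- ===== PORT A =====
-- loop body of A: midline skip, then four independent increment branches
def pvStepA (mx my : Int) (s : Int × Int × Int × Int) (r : Int × Int) : Int × Int × Int × Int :=
  if r.1 = mx ∨ r.2 = my then s
  else
    let s := if r.1 < mx ∧ r.2 < my then (s.1 + 1, s.2.1, s.2.2.1, s.2.2.2) else s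
    let s := if r.1 > mx ∧ r.2 < my then (s.1, s.2.1 + 1, s.2.2.1, s.2.2.2) else s
    let s := if r.1 < mx ∧ r.2 > my then (s.1, s.2.1, s.2.2.1 + 1, s.2.2.2) else s
    if r.1 > mx ∧ r.2 > my then (s.1, s.2.1, s.2.2.1, s.2.2.2 + 1) else s

def quadrant_counts (arr : Int × Int) (end_positions : List (Int × Int)) : Int × Int × Int × Int :=
  let mid_y := PySem.Int.floordiv arr.1 2
  let mid_x := PySem.Int.floordiv arr.2 2
  end_positions.foldl (pvStepA mid_x mid_y) (0, 0, 0, 0)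

-- ===== PORT B =====
def quadrant_counts_alt (arr : Int × Int) (end_positions : List (Int × Int)) : Int × Int × Int × Int :=
  let mid_y := PySem.Int.floordiv arr.1 2
  let mid_x := PySem.Int.floordiv arr.2 2
  ((end_positions.countP (fun r => r.1 < mid_x && r.2 < mid_y) : Int),
   (end_positions.countP (fun r => r.1 > mid_x && r.2 < mid_y) : Int),
   (end_positions.countP (fun r => r.1 < mid_x && r.2 > mid_y) : Int),
   (end_positions.countP (fun r => r.1 > mid_x && r.2 > mid_y) : Int))

-- ===== PRECONDITION & SPEC =====
def Spec_quadrant_counts (arr : Int × Int) (end_positions : List (Int × Int)) (out : Int × Int × Int × Int) : Prop := out = quadrant_counts_alt arr end_positions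
instance (arr : Int × Int) (end_positions : List (Int × Int)) (out : Int × Int × Int × Int) : Decidable (Spec_quadrant_counts arr end_positions out) := by unfold Spec_quadrant_counts; infer_instance

-- ===== CLAIM (what is proved, stated in full; the proofs are below) =====
def Claim_equal_quadrant_counts : Prop := ∀ (arr : Int × Int) (end_positions : List (Int × Int)), Dom_quadrant_counts arr end_positions → Spec_quadrant_counts arr end_positions (quadrant_counts arr end_positions)

-- ===== LEMMAS AND PROOFS =====
theorem foldl_stepA_eq (mx my : Int) (l : List (Int × Int)) (s : Int × Int × Int × Int) :
    l.foldl (pvStepA mx my) s =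
      (s.1 + (l.countP (fun r => r.1 < mx && r.2 < my) : Int),
       s.2.1 + (l.countP (fun r => r.1 > mx && r.2 < my) : Int),
       s.2.2.1 + (l.countP (fun r => r.1 < mx && r.2 > my) : Int),
       s.2.2.2 + (l.countP (fun r => r.1 > mx && r.2 > my) : Int)) := by
  induction l generalizing s with
  | nil => simp
  | cons r t ih =>
    simp only [List.foldl_cons, List.countP_cons, ih, pvStepA,
      Bool.and_eq_true, decide_eq_true_eq]
    split_ifs <;> simp_all [Prod.ext_iff] <;> omega

-- ===== VERDICT (by name: the statement is the Claim_ definition above) =====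
theorem quadrant_counts_spec : Claim_equal_quadrant_counts := by
  intro arr eps _
  unfold Spec_quadrant_counts quadrant_counts quadrant_counts_alt
  simp [foldl_stepA_eq]
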